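-- pv_equiv track=rewrite | github.com/leeyounwoo/Algorithm | In SSAFY/1008/hong267/4366_정식이의은행업무/s1.py | change_decimal
-- ===== SOURCE A (Python) =====
-- def change_decimal(num_list, n):
--     if n == 2:
--         result = 0
--         for i in range(len(num_list)):
--             result += (2 ** (len(num_list)-1-i)) * num_list[i]
--         return result
--     else:
--         result = 0
--         for i in range(len(num_list)):
--             result += (3 ** (len(num_list)-1-i)) * num_list[i]
--         return result
-- ===== SOURCE B (Python) =====
-- def change_decimal(num_list, n):
--     base = 2 if n == 2 else 3
--     result = 0
--     for d in num_list:
--         result = result * base + d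
--     return result
-- ===== Notes on version B (the rewrite author's own statement) =====
-- stated objective: faster
-- what changed: Replaces the indexed loop that recomputes base**(len-1-i) for every position with a single Horner pass (result = result*base + digit), removing all power computations.
import Mathlib
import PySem

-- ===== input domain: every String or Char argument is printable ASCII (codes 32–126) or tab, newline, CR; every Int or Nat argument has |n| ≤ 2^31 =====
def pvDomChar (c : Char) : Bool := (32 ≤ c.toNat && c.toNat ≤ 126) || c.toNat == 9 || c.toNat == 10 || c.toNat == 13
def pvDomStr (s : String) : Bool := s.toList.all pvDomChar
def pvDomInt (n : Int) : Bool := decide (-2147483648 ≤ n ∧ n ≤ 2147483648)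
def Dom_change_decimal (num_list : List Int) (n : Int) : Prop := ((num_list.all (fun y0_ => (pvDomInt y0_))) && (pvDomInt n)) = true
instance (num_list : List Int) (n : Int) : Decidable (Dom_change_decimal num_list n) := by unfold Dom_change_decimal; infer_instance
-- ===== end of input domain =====

-- B replaces A's per-index power recomputation (base**(len-1-i)) with a single Horner pass; objective: faster.

-- ===== PORT A =====
def change_decimal (num_list : List Int) (n : Int) : Int :=
  if n == 2 then
    (PySem.List.pyRange 0 (num_list.length : Int) 1).foldl
      (fun result i =>
        result + 2 ^ (((num_list.length : Int) - 1 - i).toNat) * PySem.List.pyGetD num_list i 0) 0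
  else
    (PySem.List.pyRange 0 (num_list.length : Int) 1).foldl
      (fun result i =>
        result + 3 ^ (((num_list.length : Int) - 1 - i).toNat) * PySem.List.pyGetD num_list i 0) 0

-- ===== PORT B =====
def change_decimal_alt (num_list : List Int) (n : Int) : Int :=
  let base : Int := if n == 2 then 2 else 3
  num_list.foldl (fun result d => result * base + d) 0

-- ===== PRECONDITION & SPEC =====
def Spec_change_decimal (num_list : List Int) (n : Int) (out : Int) : Prop := out = change_decimal_alt num_list n
instance (num_list : List Int) (n : Int) (out : Int) : Decidable (Spec_change_decimal num_list n out) := by unfold Spec_change_decimal; infer_instance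

-- ===== CLAIM (what is proved, stated in full; the proofs are below) =====
def Claim_equal_change_decimal : Prop := ∀ (num_list : List Int) (n : Int), Dom_change_decimal num_list n → Spec_change_decimal num_list n (change_decimal num_list n)

-- ===== LEMMAS AND PROOFS =====

-- range (n+1) written cons-style, for left-to-right induction.
theorem range_cons (n : Nat) : List.range (n+1) = 0 :: (List.range n).map (·+1) := by
  induction n with
  | zero => rfl
  | succ m ih =>
    conv_lhs => rw [List.range_succ, ih]
    conv_rhs => rw [List.range_succ]
    simp

-- Horner's fold with an arbitrary accumulator.
theorem horner_acc (base : Int) (xs : List Int) (acc : Int) :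
    xs.foldl (fun r d => r * base + d) acc
      = acc * base ^ xs.length + xs.foldl (fun r d => r * base + d) 0 := by
  induction xs generalizing acc with
  | nil => simp
  | cons x t ih =>
    simp only [List.foldl_cons, List.length_cons]
    rw [ih (acc * base + x), ih (0 * base + x)]
    ring

-- Positional sum (Nat indices) equals Horner's fold.
theorem sum_pow_eq_horner (base : Int) (xs : List Int) :
    ((List.range xs.length).map
        (fun k => base ^ (xs.length - 1 - k) * xs.getD k 0)).sum
      = xs.foldl (fun r d => r * base + d) 0 := by
  induction xs with
  | nil => simp
  | cons x t ih =>
    rw [List.length_cons, range_cons, List.map_cons, List.sum_cons, List.map_map]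
    have h1 : ((List.range t.length).map
        ((fun k => base ^ (t.length + 1 - 1 - k) * (x :: t).getD k 0) ∘ (·+1))).sum
        = ((List.range t.length).map
            (fun k => base ^ (t.length - 1 - k) * t.getD k 0)).sum := by
      refine congrArg List.sum (List.map_congr_left ?_)
      intro k hk
      simp only [Function.comp_apply, List.getD_cons_succ]
      congr 2
      omega
    rw [h1, ih, List.foldl_cons, horner_acc base t (0 * base + x)]
    simp only [Nat.add_sub_cancel, Nat.sub_zero, List.getD_cons_zero]
    ring

-- A's range-indexed loop equals Horner's fold over the list.
theorem loopA_eq_horner (base : Int) (xs : List Int) :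
    (PySem.List.pyRange 0 (xs.length : Int) 1).foldl
      (fun result i =>
        result + base ^ (((xs.length : Int) - 1 - i).toNat) * PySem.List.pyGetD xs i 0) 0
      = xs.foldl (fun r d => r * base + d) 0 := by
  rw [PySem.List.foldl_add]
  rw [PySem.List.pyRange_one, List.map_map]
  simp only [Int.sub_zero, Int.toNat_natCast, zero_add]
  rw [← sum_pow_eq_horner base xs]
  refine congrArg List.sum (List.map_congr_left ?_)
  intro k hk
  rw [List.mem_range] at hk
  simp only [Function.comp_apply, PySem.List.pyGetD_natCast]
  congr 2
  omega

-- ===== VERDICT (by name: the statement is the Claim_ definition above) =====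
theorem change_decimal_spec : Claim_equal_change_decimal := by
  intro num_list n _
  unfold Spec_change_decimal change_decimal change_decimal_alt
  by_cases h : n = 2
  · simp only [h, beq_self_eq_true, if_true]
    exact loopA_eq_horner 2 num_list
  · have hb : (n == 2) = false := by simp [h]
    simp only [hb]
    exact loopA_eq_horner 3 num_list
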